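-- pv_equiv track=rewrite | github.com/leoapplecool/schulmanager-discord-bot | src/schulmanager_discord_bot/bot.py | _summarize_updates
-- ===== SOURCE A (Python) =====
-- def _summarize_updates(updates: list[str]) -> tuple[int, int, int, list[str]]:
--     created = updated = deleted = 0
--     samples: list[str] = []
--     for item in updates:
--         if ":" not in item:
--             continue
--         key, action = item.rsplit(":", maxsplit=1)
--         action = action.strip()
--         if action == "created":
--             created += 1
--         elif action == "updated":
--             updated += 1
--         elif action == "deleted":
--             deleted += 1
--         if len(samples) < 3:
--             samples.append(key)
--     return created, updated, deleted, samples
-- ===== SOURCE B (Python) =====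
-- def _summarize_updates(updates: list[str]) -> tuple[int, int, int, list[str]]:
--     parsed = [item.rsplit(":", maxsplit=1) for item in updates if ":" in item]
--     actions = [action.strip() for _, action in parsed]
--     samples = [key for key, _ in parsed[:3]]
--     return actions.count("created"), actions.count("updated"), actions.count("deleted"), samples
-- ===== Notes on version B (the rewrite author's own statement) =====
-- stated objective: simpler
-- what changed: The single fused loop with four mutable accumulators is replaced by materialising the parsed (key, action) pairs once and then three independent shapes over it: a comprehension of stripped actions counted with list.count, and a slice comprehension for the first three keys.
import Mathlib
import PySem

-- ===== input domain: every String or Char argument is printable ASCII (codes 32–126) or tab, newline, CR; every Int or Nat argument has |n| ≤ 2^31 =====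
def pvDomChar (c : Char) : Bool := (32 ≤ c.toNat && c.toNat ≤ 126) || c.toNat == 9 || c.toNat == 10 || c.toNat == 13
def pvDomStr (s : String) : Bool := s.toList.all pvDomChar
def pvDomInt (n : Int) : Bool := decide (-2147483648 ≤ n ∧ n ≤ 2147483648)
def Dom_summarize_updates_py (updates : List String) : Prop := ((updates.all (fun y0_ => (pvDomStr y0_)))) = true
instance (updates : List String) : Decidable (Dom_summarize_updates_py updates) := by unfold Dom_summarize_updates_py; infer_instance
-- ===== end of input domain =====

-- B replaces A's fused loop with four accumulators by one materialised parsed list and three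
-- independent passes (count, count, count via list.count and a slice of keys); simpler, same cost.

-- shared primitive port: s.rsplit(":", maxsplit=1) for a string that contains ":" —
-- exact: key = chars before the LAST ':', action = chars after it.
def pyRsplitColon1 (s : String) : String × String :=
  let r := s.toList.reverse
  (String.ofList ((r.dropWhile (fun c => c ≠ ':')).drop 1).reverse,
   String.ofList ((r.takeWhile (fun c => c ≠ ':')).reverse))

-- ===== PORT A =====
-- loop body of A, one item at a time over the state (created, updated, deleted, samples)
def suStep (st : Int × Int × Int × List String) (item : String) : Int × Int × Int × List String :=
  if PySem.Str.isIn ":" item then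
    let kv := pyRsplitColon1 item
    let action := PySem.Str.strip kv.2
    let cud : Int × Int × Int :=
      if action = "created" then (st.1 + 1, st.2.1, st.2.2.1)
      else if action = "updated" then (st.1, st.2.1 + 1, st.2.2.1)
      else if action = "deleted" then (st.1, st.2.1, st.2.2.1 + 1)
      else (st.1, st.2.1, st.2.2.1)
    let samples := if st.2.2.2.length < 3 then st.2.2.2 ++ [kv.1] else st.2.2.2
    (cud.1, cud.2.1, cud.2.2, samples)
  else st

def summarize_updates_py (updates : List String) : Int × Int × Int × List String :=
  updates.foldl suStep (0, 0, 0, [])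

-- ===== PORT B =====
def summarize_updates_py_alt (updates : List String) : Int × Int × Int × List String :=
  let parsed := (updates.filter (fun item => PySem.Str.isIn ":" item)).map pyRsplitColon1
  let actions := parsed.map (fun p => PySem.Str.strip p.2)
  ((actions.count "created" : Int), (actions.count "updated" : Int), (actions.count "deleted" : Int),
   (parsed.take 3).map Prod.fst)

-- ===== PRECONDITION & SPEC =====
def Spec_summarize_updates_py (updates : List String) (out : Int × Int × Int × List String) : Prop := out = summarize_updates_py_alt updates
instance (updates : List String) (out : Int × Int × Int × List String) : Decidable (Spec_summarize_updates_py updates out) := by unfold Spec_summarize_updates_py; infer_instance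

-- ===== CLAIM (what is proved, stated in full; the proofs are below) =====
def Claim_equal_summarize_updates_py : Prop := ∀ (updates : List String), Dom_summarize_updates_py updates → Spec_summarize_updates_py updates (summarize_updates_py updates)

-- ===== LEMMAS AND PROOFS =====

-- A's fold from an arbitrary state, characterised by B's three passes over the parsed list.
lemma suFold_eq (updates : List String) (c u d : Int) (samples : List String) :
    updates.foldl suStep (c, u, d, samples) =
      (c + ((((updates.filter (fun item => PySem.Str.isIn ":" item)).map pyRsplitColon1).map
              (fun p => PySem.Str.strip p.2)).count "created" : Int),
       u + ((((updates.filter (fun item => PySem.Str.isIn ":" item)).map pyRsplitColon1).map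
              (fun p => PySem.Str.strip p.2)).count "updated" : Int),
       d + ((((updates.filter (fun item => PySem.Str.isIn ":" item)).map pyRsplitColon1).map
              (fun p => PySem.Str.strip p.2)).count "deleted" : Int),
       samples ++ ((((updates.filter (fun item => PySem.Str.isIn ":" item)).map pyRsplitColon1).take
              (3 - samples.length)).map Prod.fst)) := by
  induction updates generalizing c u d samples with
  | nil => simp
  | cons item rest ih =>
    by_cases h : PySem.Str.isIn ":" item
    · simp only [List.foldl_cons, suStep, if_pos h, List.filter_cons_of_pos h, List.map_cons, ih]
      generalize (List.filter (fun item => PySem.Str.isIn ":" item) rest).map pyRsplitColon1 = ps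
      by_cases hl : samples.length < 3
      · have h3 : 3 - samples.length = (3 - (samples ++ [(pyRsplitColon1 item).1]).length) + 1 := by
          simp; omega
        simp only [if_pos hl, h3, List.take_succ_cons, List.map_cons, List.count_cons,
          List.append_assoc, List.cons_append, List.nil_append, Prod.mk.injEq]
        refine ⟨?_, ?_, ?_, by simp⟩ <;>
          · split_ifs with h1 h2 h3 <;> first | (push_cast; omega) | simp_all
      · have h3 : 3 - samples.length = 0 := by omega
        simp only [if_neg hl, h3, List.take_zero, List.count_cons, List.map_nil,
          List.append_nil, Prod.mk.injEq]
        refine ⟨?_, ?_, ?_, by simp⟩ <;>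
          · split_ifs with h1 h2 h3 <;> first | (push_cast; omega) | simp_all
    · simp only [List.foldl_cons, suStep, if_neg h, List.filter_cons_of_neg h, ih]

-- ===== VERDICT (by name: the statement is the Claim_ definition above) =====
theorem summarize_updates_py_spec : Claim_equal_summarize_updates_py := by
  intro updates _
  unfold Spec_summarize_updates_py summarize_updates_py summarize_updates_py_alt
  simp [suFold_eq]
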